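-- pv_equiv track=rewrite | github.com/yeedaKing/USC-CAR-Scripts | generate_summary.py | get_date_range_key
-- ===== SOURCE A (Python) =====
-- def get_date_range_key(month, day):
--     assert day >= 1
--     bins = [1, 8, 15, 22, 29]
--     indx = 4
--     while day < bins[indx]:
--         indx -= 1
--
--     if indx == 4:
--         return "Mar 29 - Apr 04 2023"
--
--     mon = "Feb" if month == 2 else "Mar"
--     return f"{mon} {str(bins[indx]).zfill(2)} - {mon} {str(bins[indx+1]-1).zfill(2)} 2023"
-- ===== SOURCE B (Python) =====
-- def get_date_range_key(month, day):
--     assert day >= 1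
--     if day >= 29:
--         return "Mar 29 - Apr 04 2023"
--     start = ((day - 1) // 7) * 7 + 1
--     mon = "Feb" if month == 2 else "Mar"
--     return f"{mon} {str(start).zfill(2)} - {mon} {str(start + 6).zfill(2)} 2023"
-- ===== Notes on version B (the rewrite author's own statement) =====
-- stated objective: simpler
-- what changed: The bins list and the backwards while-loop scan are removed entirely: B handles day>=29 with an early return and otherwise computes the week start and end directly by arithmetic, start = ((day-1)//7)*7 + 1 and end = start + 6.
import Mathlib
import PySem

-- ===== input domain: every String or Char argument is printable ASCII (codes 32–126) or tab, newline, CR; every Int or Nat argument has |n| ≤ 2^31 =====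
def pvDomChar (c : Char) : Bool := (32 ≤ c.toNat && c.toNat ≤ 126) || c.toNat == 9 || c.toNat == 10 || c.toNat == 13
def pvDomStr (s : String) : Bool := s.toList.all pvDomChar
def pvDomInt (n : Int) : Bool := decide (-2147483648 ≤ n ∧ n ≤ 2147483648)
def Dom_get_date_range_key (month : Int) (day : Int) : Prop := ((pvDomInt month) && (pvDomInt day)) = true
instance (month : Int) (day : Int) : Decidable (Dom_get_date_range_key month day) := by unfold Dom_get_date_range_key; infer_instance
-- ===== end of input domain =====

-- B drops the bins table and the backwards while-loop scan: an early return for day >= 29,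
-- otherwise the week bounds are computed by arithmetic; objective: simpler.

-- ===== PORT A =====
-- bins = [1, 8, 15, 22, 29]
def pvBins : List Int := [1, 8, 15, 22, 29]

-- the while-loop: indx starts at 4 and is decremented while day < bins[indx];
-- structural recursion on indx (within Pre_ the loop never goes below 0)
def pvLoopA (day : Int) : Nat → Nat
  | 0 => 0
  | n + 1 => if day < (PySem.List.pyGet? pvBins ((n : Int) + 1)).getD 0 then pvLoopA day n else n + 1

def get_date_range_key (month : Int) (day : Int) : String :=
  let indx := pvLoopA day 4
  if indx = 4 then "Mar 29 - Apr 04 2023"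
  else
    let mon := if month = 2 then "Feb" else "Mar"
    mon ++ " " ++ PySem.Str.zfill (PySem.Int.toStr ((PySem.List.pyGet? pvBins (indx : Int)).getD 0)) 2
        ++ " - " ++ mon ++ " "
        ++ PySem.Str.zfill (PySem.Int.toStr ((PySem.List.pyGet? pvBins ((indx : Int) + 1)).getD 0 - 1)) 2
        ++ " 2023"

-- ===== PORT B =====
def get_date_range_key_alt (month : Int) (day : Int) : String :=
  if 29 ≤ day then "Mar 29 - Apr 04 2023"
  else
    let start : Int := (PySem.Int.floordiv (day - 1) 7) * 7 + 1
    let mon := if month = 2 then "Feb" else "Mar"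
    mon ++ " " ++ PySem.Str.zfill (PySem.Int.toStr start) 2
        ++ " - " ++ mon ++ " "
        ++ PySem.Str.zfill (PySem.Int.toStr (start + 6)) 2
        ++ " 2023"

-- ===== PRECONDITION & SPEC =====
-- Pre_ excludes day < 1, where Python A raises AssertionError (assert day >= 1).
def Pre_get_date_range_key (month : Int) (day : Int) : Prop := 1 ≤ day
instance (month : Int) (day : Int) : Decidable (Pre_get_date_range_key month day) := by unfold Pre_get_date_range_key; infer_instance
def pvWitness_get_date_range_key : Int × Int := (2, 10)

def Spec_get_date_range_key (month : Int) (day : Int) (out : String) : Prop := out = get_date_range_key_alt month day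
instance (month : Int) (day : Int) (out : String) : Decidable (Spec_get_date_range_key month day out) := by unfold Spec_get_date_range_key; infer_instance

-- ===== CLAIM =====
def Claim_equal_get_date_range_key : Prop := ∀ (month : Int) (day : Int), Dom_get_date_range_key month day → Pre_get_date_range_key month day → Spec_get_date_range_key month day (get_date_range_key month day)

-- ===== LEMMAS AND PROOFS =====

theorem pv_floordiv7 (x q : Int) (h1 : 7 * q ≤ x) (h2 : x < 7 * (q + 1)) :
    PySem.Int.floordiv x 7 = q := by
  rw [PySem.Int.floordiv_eq_ediv_of_pos (by omega)]; omega

-- ===== VERDICT =====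
theorem get_date_range_key_spec : Claim_equal_get_date_range_key := by
  intro month day _ hpre
  unfold Pre_get_date_range_key at hpre
  unfold Spec_get_date_range_key get_date_range_key get_date_range_key_alt
  by_cases h29 : day < 29
  · by_cases h22 : day < 22
    · by_cases h15 : day < 15
      · by_cases h8 : day < 8
        · have hA : pvLoopA day 4 = 0 := by
            simp [pvLoopA, pvBins, PySem.List.pyGet?, PySem.List.pyIdx?, h29, h22, h15, h8]
          have hB : PySem.Int.floordiv (day - 1) 7 = 0 := pv_floordiv7 _ 0 (by omega) (by omega)
          have hne : ¬ (29 ≤ day) := by omega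
          simp only [hA, hB, hne, if_false]
          rfl
        · have hA : pvLoopA day 4 = 1 := by
            simp [pvLoopA, pvBins, PySem.List.pyGet?, PySem.List.pyIdx?, h29, h22, h15, h8]
          have hB : PySem.Int.floordiv (day - 1) 7 = 1 := pv_floordiv7 _ 1 (by omega) (by omega)
          have hne : ¬ (29 ≤ day) := by omega
          simp only [hA, hB, hne, if_false]
          rfl
      · have hA : pvLoopA day 4 = 2 := by
          simp [pvLoopA, pvBins, PySem.List.pyGet?, PySem.List.pyIdx?, h29, h22, h15]
        have hB : PySem.Int.floordiv (day - 1) 7 = 2 := pv_floordiv7 _ 2 (by omega) (by omega)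
        have hne : ¬ (29 ≤ day) := by omega
        simp only [hA, hB, hne, if_false]
        rfl
    · have hA : pvLoopA day 4 = 3 := by
        simp [pvLoopA, pvBins, PySem.List.pyGet?, PySem.List.pyIdx?, h29, h22]
      have hB : PySem.Int.floordiv (day - 1) 7 = 3 := pv_floordiv7 _ 3 (by omega) (by omega)
      have hne : ¬ (29 ≤ day) := by omega
      simp only [hA, hB, hne, if_false]
      rfl
  · have hA : pvLoopA day 4 = 4 := by
      simp [pvLoopA, pvBins, PySem.List.pyGet?, PySem.List.pyIdx?, h29]
    have hge : (29:Int) ≤ day := by omega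
    simp only [hA, hge, if_pos]
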